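-- pv_equiv track=rewrite | github.com/Certseeds/CS303_AI | Ass1_Gomoku/Gomoku_fourth.py | judgement_multiply_live_jump_four_or_three
-- ===== SOURCE A (Python) =====
-- def judgement_multiply_live_jump_four_or_three(align, color,willreturn = False):
--     net_score = 0
--     multiply_four = 0
--     multiply_three = 0
--     multiply_sleep_three = 0
--
--     for i in align:
--         if len(i) < 5:
--             continue
--         for j in range(0, len(i)-4):
--             # 冲四 1
--             if i[j] == color and i[j+1] == 0 and i[j+2] == color and i[j+3] == color and i[j+4] == color:
--                 net_score += 1000
--                 multiply_four += 1
--             elif i[j] == color and i[j + 1] == color and i[j + 2] == 0 and i[j + 3] == color and i[j + 4] == color: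
--                 net_score += 1000
--                 multiply_four += 1
--             elif i[j] == color and i[j + 1] == color and i[j + 2] == color and i[j + 3] == 0 and i[j + 4] == color:
--                 net_score += 1000
--                 multiply_four += 1
--             # 眠三 1
--             if i[j] == color  and i[j + 1] == 0 and i[j + 2] == 0 and i[j + 3] == color and i[j+4] == color:
--                 net_score += 51
--                 multiply_sleep_three += 1
--             elif i[j] == color  and i[j + 1] == color and i[j + 2] == 0 and i[j + 3] == 0 and i[j+4] == color:
--                 net_score += 51
--                 multiply_sleep_three += 1
--             elif i[j] == color  and i[j + 1] == 0 and i[j + 2] == color and i[j + 3] == 0 and i[j+4] == color: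
--                 net_score += 51
--                 multiply_sleep_three += 1
--             # 活三 1
--             if i[j] == 0 and i[j + 1] == color and i[j + 2] == color and i[j + 3] == color and i[j + 4] == 0:
--                 net_score += 200
--                 multiply_three += 1
--         if len(i) < 6:
--             continue
--         for j in range(0, len(i)-5):
--             # 冲四 2
--             if i[j] == 0 and i[j+1] == color and i[j+2] == color and i[j+3] == color and i[j+4] == color and i[j+5] == -1*color:
--                 net_score += 1000
--                 multiply_four += 1
--             elif i[j+5] == 0 and i[j+1] == color and i[j+2] == color and i[j+3] == color and i[j+4] == color and i[j] == -1*color: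
--                 net_score += 1000
--                 multiply_four += 1
--             # 活三 2
--             if i[j] == 0 and i[j + 1] == color and i[j + 2] == color and i[j + 3] == 0 and i[j + 4] == color and i[j + 5] == 0:
--                 net_score += 200
--                 multiply_three += 1
--             elif i[j] == 0 and i[j + 1] == color and i[j + 2] == 0  and i[j + 3] == color and i[j + 4] == color and i[j + 5] == 0:
--                 net_score += 200
--                 multiply_three += 1
--             # 眠三 2
--             if i[j] == 0 and i[j + 1] == 0 and i[j + 2] == color and i[j + 3] == color and i[j + 4] == color and i[j + 5] == color * -1:
--                 net_score += 51
--                 multiply_sleep_three += 1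
--             elif i[j] == color* -1 and i[j + 1] == color and i[j + 2] == color and i[j + 3] == color and i[j + 4] == 0 and i[j + 5] == 0:
--                 net_score += 51
--                 multiply_sleep_three += 1
--             elif i[j] == 0 and i[j + 1] == color and i[j + 2] == 0 and i[j + 3] == color and i[j + 4] == color and i[j + 5] == color * -1:
--                 net_score += 51
--                 multiply_sleep_three += 1
--             elif i[j] == color* -1 and i[j + 1] == color and i[j + 2] == color and i[j + 3] == 0 and i[j + 4] == color and i[j + 5] == 0:
--                 net_score += 51
--                 multiply_sleep_three += 1
--             elif i[j] == 0 and i[j + 1] == color and i[j + 2] == color and i[j + 3] == 0 and i[j + 4] == color and i[j + 5] == color * -1: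
--                 net_score += 51
--                 multiply_sleep_three += 1
--             elif i[j] == color* -1 and i[j + 1] == color and i[j + 2] == 0 and i[j + 3] == color and i[j + 4] == color and i[j + 5] == 0:
--                 net_score += 51
--                 multiply_sleep_three += 1
--         if len(i) < 7:
--             continue
--         for j in range(0,len(i) - 6):
--             if i[j] == color * -1 and i[j + 1] == 0and i[j + 2] == color and i[j + 3] == color and i[j + 4] == color and i[j + 5] == 0 and i[j+6] == color * -1:
--                 net_score += 51
--                 multiply_sleep_three += 1
--     if multiply_four >= 2 or (multiply_three >= 1 and multiply_four >= 1) or multiply_three >= 2: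
--         net_score += 5141 * (multiply_three + multiply_four)
--     elif multiply_three >= 1 and multiply_sleep_three >= 1:
--         net_score += 514 * (multiply_three + multiply_sleep_three)
--     return net_score, multiply_four, multiply_three, multiply_sleep_three
-- ===== SOURCE B (Python) =====
-- def _occ(line, pat):
--     L = len(pat)
--     return sum(1 for j in range(len(line) - L + 1) if tuple(line[j:j + L]) == pat)
--
--
-- def judgement_multiply_live_jump_four_or_three(align, color, willreturn=False):
--     C, O = color, -color
--     # each rule: (patterns of one mutually-exclusive elif group, score, d_four, d_three, d_sleep)
--     groups = [
--         (((C, 0, C, C, C), (C, C, 0, C, C), (C, C, C, 0, C)), 1000, 1, 0, 0),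
--         (((C, 0, 0, C, C), (C, C, 0, 0, C), (C, 0, C, 0, C)), 51, 0, 0, 1),
--         (((0, C, C, C, 0),), 200, 0, 1, 0),
--         (((0, C, C, C, C, O), (O, C, C, C, C, 0)), 1000, 1, 0, 0),
--         (((0, C, C, 0, C, 0), (0, C, 0, C, C, 0)), 200, 0, 1, 0),
--         (((0, 0, C, C, C, O), (O, C, C, C, 0, 0), (0, C, 0, C, C, O),
--           (O, C, C, 0, C, 0), (0, C, C, 0, C, O), (O, C, 0, C, C, 0)), 51, 0, 0, 1),
--         (((O, 0, C, C, C, 0, O),), 51, 0, 0, 1),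
--     ]
--     net = four = three = sleep = 0
--     for pats, score, df, dt, ds in groups:
--         # dedupe keeping first occurrence: when color == 0 several patterns of a
--         # group coincide, and only one of an elif group may fire per window
--         uniq = list(dict.fromkeys(pats))
--         occ = sum(_occ(line, p) for line in align for p in uniq)
--         net += score * occ
--         four += df * occ
--         three += dt * occ
--         sleep += ds * occ
--     if four >= 2 or (three >= 1 and four >= 1) or three >= 2:
--         net += 5141 * (three + four)
--     elif three >= 1 and sleep >= 1:
--         net += 514 * (three + sleep)
--     return net, four, three, sleep
-- ===== Notes on version B (the rewrite author's own statement) =====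
-- stated objective: alternative
-- what changed: Inverts the loop structure: instead of sliding a window over each line and running 14 if/elif index-comparison chains per position, B iterates pattern-group-major, counting overlapping occurrences of each (first-occurrence-deduplicated) pattern across all lines and adding score*count and counter*count once per group; the per-line length guards and per-position state disappear, correctness resting on the mutual exclusivity of each elif group's patterns.
import Mathlib
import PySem

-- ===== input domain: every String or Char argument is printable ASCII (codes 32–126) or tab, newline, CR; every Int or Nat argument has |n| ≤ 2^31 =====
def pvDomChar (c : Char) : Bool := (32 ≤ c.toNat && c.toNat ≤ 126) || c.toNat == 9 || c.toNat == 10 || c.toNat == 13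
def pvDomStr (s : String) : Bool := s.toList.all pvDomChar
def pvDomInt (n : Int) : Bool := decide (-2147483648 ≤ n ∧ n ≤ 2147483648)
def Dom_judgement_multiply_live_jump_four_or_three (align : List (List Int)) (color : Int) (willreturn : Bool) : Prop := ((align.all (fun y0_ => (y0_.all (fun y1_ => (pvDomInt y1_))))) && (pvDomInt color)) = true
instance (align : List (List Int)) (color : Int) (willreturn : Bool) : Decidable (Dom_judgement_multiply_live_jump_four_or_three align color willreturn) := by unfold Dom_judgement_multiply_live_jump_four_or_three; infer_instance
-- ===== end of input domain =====

-- B inverts the loop structure: pattern-group-major occurrence counting (score*count added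
-- once per group) instead of A's window-major if/elif chains (objective: alternative).

-- ===== PORT A =====
-- Python indexing i[j+k]: always in range at every use site (j from range(0, len-L+1)), so getD 0 is never the error case.
def gA (l : List Int) (j : Int) : Int := (PySem.List.pyGet? l j).getD 0

def blockA5four (color : Int) (i : List Int) (j : Int) (s : Int × Int × Int × Int) : Int × Int × Int × Int :=
  if gA i j = color ∧ gA i (j+1) = 0 ∧ gA i (j+2) = color ∧ gA i (j+3) = color ∧ gA i (j+4) = color then
    (s.1 + 1000, s.2.1 + 1, s.2.2.1, s.2.2.2)
  else if gA i j = color ∧ gA i (j+1) = color ∧ gA i (j+2) = 0 ∧ gA i (j+3) = color ∧ gA i (j+4) = color then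
    (s.1 + 1000, s.2.1 + 1, s.2.2.1, s.2.2.2)
  else if gA i j = color ∧ gA i (j+1) = color ∧ gA i (j+2) = color ∧ gA i (j+3) = 0 ∧ gA i (j+4) = color then
    (s.1 + 1000, s.2.1 + 1, s.2.2.1, s.2.2.2)
  else s

def blockA5sleep (color : Int) (i : List Int) (j : Int) (s : Int × Int × Int × Int) : Int × Int × Int × Int :=
  if gA i j = color ∧ gA i (j+1) = 0 ∧ gA i (j+2) = 0 ∧ gA i (j+3) = color ∧ gA i (j+4) = color then
    (s.1 + 51, s.2.1, s.2.2.1, s.2.2.2 + 1)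
  else if gA i j = color ∧ gA i (j+1) = color ∧ gA i (j+2) = 0 ∧ gA i (j+3) = 0 ∧ gA i (j+4) = color then
    (s.1 + 51, s.2.1, s.2.2.1, s.2.2.2 + 1)
  else if gA i j = color ∧ gA i (j+1) = 0 ∧ gA i (j+2) = color ∧ gA i (j+3) = 0 ∧ gA i (j+4) = color then
    (s.1 + 51, s.2.1, s.2.2.1, s.2.2.2 + 1)
  else s

def blockA5three (color : Int) (i : List Int) (j : Int) (s : Int × Int × Int × Int) : Int × Int × Int × Int :=
  if gA i j = 0 ∧ gA i (j+1) = color ∧ gA i (j+2) = color ∧ gA i (j+3) = color ∧ gA i (j+4) = 0 then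
    (s.1 + 200, s.2.1, s.2.2.1 + 1, s.2.2.2)
  else s

-- the three independent if-blocks of A's length-5 loop body, applied in source order
def stepA5 (color : Int) (i : List Int) (s : Int × Int × Int × Int) (j : Int) : Int × Int × Int × Int :=
  blockA5three color i j (blockA5sleep color i j (blockA5four color i j s))

def blockA6four (color : Int) (i : List Int) (j : Int) (s : Int × Int × Int × Int) : Int × Int × Int × Int :=
  if gA i j = 0 ∧ gA i (j+1) = color ∧ gA i (j+2) = color ∧ gA i (j+3) = color ∧ gA i (j+4) = color ∧ gA i (j+5) = -1*color then
    (s.1 + 1000, s.2.1 + 1, s.2.2.1, s.2.2.2)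
  else if gA i (j+5) = 0 ∧ gA i (j+1) = color ∧ gA i (j+2) = color ∧ gA i (j+3) = color ∧ gA i (j+4) = color ∧ gA i j = -1*color then
    (s.1 + 1000, s.2.1 + 1, s.2.2.1, s.2.2.2)
  else s

def blockA6three (color : Int) (i : List Int) (j : Int) (s : Int × Int × Int × Int) : Int × Int × Int × Int :=
  if gA i j = 0 ∧ gA i (j+1) = color ∧ gA i (j+2) = color ∧ gA i (j+3) = 0 ∧ gA i (j+4) = color ∧ gA i (j+5) = 0 then
    (s.1 + 200, s.2.1, s.2.2.1 + 1, s.2.2.2)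
  else if gA i j = 0 ∧ gA i (j+1) = color ∧ gA i (j+2) = 0 ∧ gA i (j+3) = color ∧ gA i (j+4) = color ∧ gA i (j+5) = 0 then
    (s.1 + 200, s.2.1, s.2.2.1 + 1, s.2.2.2)
  else s

def blockA6sleep (color : Int) (i : List Int) (j : Int) (s : Int × Int × Int × Int) : Int × Int × Int × Int :=
  if gA i j = 0 ∧ gA i (j+1) = 0 ∧ gA i (j+2) = color ∧ gA i (j+3) = color ∧ gA i (j+4) = color ∧ gA i (j+5) = color * -1 then
    (s.1 + 51, s.2.1, s.2.2.1, s.2.2.2 + 1)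
  else if gA i j = color * -1 ∧ gA i (j+1) = color ∧ gA i (j+2) = color ∧ gA i (j+3) = color ∧ gA i (j+4) = 0 ∧ gA i (j+5) = 0 then
    (s.1 + 51, s.2.1, s.2.2.1, s.2.2.2 + 1)
  else if gA i j = 0 ∧ gA i (j+1) = color ∧ gA i (j+2) = 0 ∧ gA i (j+3) = color ∧ gA i (j+4) = color ∧ gA i (j+5) = color * -1 then
    (s.1 + 51, s.2.1, s.2.2.1, s.2.2.2 + 1)
  else if gA i j = color * -1 ∧ gA i (j+1) = color ∧ gA i (j+2) = color ∧ gA i (j+3) = 0 ∧ gA i (j+4) = color ∧ gA i (j+5) = 0 then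
    (s.1 + 51, s.2.1, s.2.2.1, s.2.2.2 + 1)
  else if gA i j = 0 ∧ gA i (j+1) = color ∧ gA i (j+2) = color ∧ gA i (j+3) = 0 ∧ gA i (j+4) = color ∧ gA i (j+5) = color * -1 then
    (s.1 + 51, s.2.1, s.2.2.1, s.2.2.2 + 1)
  else if gA i j = color * -1 ∧ gA i (j+1) = color ∧ gA i (j+2) = 0 ∧ gA i (j+3) = color ∧ gA i (j+4) = color ∧ gA i (j+5) = 0 then
    (s.1 + 51, s.2.1, s.2.2.1, s.2.2.2 + 1)
  else s

-- the three independent if-blocks of A's length-6 loop body, applied in source order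
def stepA6 (color : Int) (i : List Int) (s : Int × Int × Int × Int) (j : Int) : Int × Int × Int × Int :=
  blockA6sleep color i j (blockA6three color i j (blockA6four color i j s))

def stepA7 (color : Int) (i : List Int) (s : Int × Int × Int × Int) (j : Int) : Int × Int × Int × Int :=
  if gA i j = color * -1 ∧ gA i (j+1) = 0 ∧ gA i (j+2) = color ∧ gA i (j+3) = color ∧ gA i (j+4) = color ∧ gA i (j+5) = 0 ∧ gA i (j+6) = color * -1 then
    (s.1 + 51, s.2.1, s.2.2.1, s.2.2.2 + 1)
  else s

def lineA (color : Int) (s : Int × Int × Int × Int) (i : List Int) : Int × Int × Int × Int :=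
  if (i.length : Int) < 5 then s else
    let s := (PySem.List.pyRange 0 ((i.length : Int) - 4) 1).foldl (stepA5 color i) s
    if (i.length : Int) < 6 then s else
      let s := (PySem.List.pyRange 0 ((i.length : Int) - 5) 1).foldl (stepA6 color i) s
      if (i.length : Int) < 7 then s else
        (PySem.List.pyRange 0 ((i.length : Int) - 6) 1).foldl (stepA7 color i) s

def judgement_multiply_live_jump_four_or_three (align : List (List Int)) (color : Int) (willreturn : Bool) : Int × Int × Int × Int :=
  let s : Int × Int × Int × Int := (0, 0, 0, 0)
  let s := align.foldl (lineA color) s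
  if s.2.1 ≥ 2 ∨ (s.2.2.1 ≥ 1 ∧ s.2.1 ≥ 1) ∨ s.2.2.1 ≥ 2 then
    (s.1 + 5141 * (s.2.2.1 + s.2.1), s.2.1, s.2.2.1, s.2.2.2)
  else if s.2.2.1 ≥ 1 ∧ s.2.2.2 ≥ 1 then
    (s.1 + 514 * (s.2.2.1 + s.2.2.2), s.2.1, s.2.2.1, s.2.2.2)
  else s

-- ===== PORT B =====
-- _occ(line, pat): number of (overlapping) start positions where pat occurs in line
def bOcc (line : List Int) (pat : List Int) : Int :=
  (PySem.List.pyRange 0 ((line.length : Int) - (pat.length : Int) + 1) 1).foldl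
    (fun n j => n + (if PySem.List.slice line (some j) (some (j + (pat.length : Int))) = pat then 1 else 0)) 0

-- each rule: (patterns of one mutually-exclusive elif group, score, d_four, d_three, d_sleep)
def bGroups (c : Int) : List (List (List Int) × Int × Int × Int × Int) :=
  [ ([[c,0,c,c,c],[c,c,0,c,c],[c,c,c,0,c]], 1000, 1, 0, 0),
    ([[c,0,0,c,c],[c,c,0,0,c],[c,0,c,0,c]], 51, 0, 0, 1),
    ([[0,c,c,c,0]], 200, 0, 1, 0),
    ([[0,c,c,c,c,-c],[-c,c,c,c,c,0]], 1000, 1, 0, 0),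
    ([[0,c,c,0,c,0],[0,c,0,c,c,0]], 200, 0, 1, 0),
    ([[0,0,c,c,c,-c],[-c,c,c,c,0,0],[0,c,0,c,c,-c],[-c,c,c,0,c,0],[0,c,c,0,c,-c],[-c,c,0,c,c,0]], 51, 0, 0, 1),
    ([[-c,0,c,c,c,0,-c]], 51, 0, 0, 1) ]

-- one group: dedupe its patterns (list(dict.fromkeys(..)) = PySem.List.dedup), total the
-- occurrences over all lines, and add score*occ / counter*occ to the running state
def bGroupStep (align : List (List Int)) (s : Int × Int × Int × Int)
    (g : List (List Int) × Int × Int × Int × Int) : Int × Int × Int × Int :=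
  let uniq := PySem.List.dedup g.1
  let occ := (align.map (fun line => (uniq.map (fun p => bOcc line p)).sum)).sum
  (s.1 + g.2.1 * occ, s.2.1 + g.2.2.1 * occ, s.2.2.1 + g.2.2.2.1 * occ, s.2.2.2 + g.2.2.2.2 * occ)

def judgement_multiply_live_jump_four_or_three_alt (align : List (List Int)) (color : Int) (willreturn : Bool) : Int × Int × Int × Int :=
  let s := (bGroups color).foldl (bGroupStep align) ((0, 0, 0, 0) : Int × Int × Int × Int)
  if s.2.1 ≥ 2 ∨ (s.2.2.1 ≥ 1 ∧ s.2.1 ≥ 1) ∨ s.2.2.1 ≥ 2 then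
    (s.1 + 5141 * (s.2.2.1 + s.2.1), s.2.1, s.2.2.1, s.2.2.2)
  else if s.2.2.1 ≥ 1 ∧ s.2.2.2 ≥ 1 then
    (s.1 + 514 * (s.2.2.1 + s.2.2.2), s.2.1, s.2.2.1, s.2.2.2)
  else s

-- ===== PRECONDITION & SPEC =====
def Spec_judgement_multiply_live_jump_four_or_three (align : List (List Int)) (color : Int) (willreturn : Bool) (out : Int × Int × Int × Int) : Prop := out = judgement_multiply_live_jump_four_or_three_alt align color willreturn
instance (align : List (List Int)) (color : Int) (willreturn : Bool) (out : Int × Int × Int × Int) : Decidable (Spec_judgement_multiply_live_jump_four_or_three align color willreturn out) := by unfold Spec_judgement_multiply_live_jump_four_or_three; infer_instance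

-- ===== CLAIM (what is proved, stated in full; the proofs are below) =====
def Claim_equal_judgement_multiply_live_jump_four_or_three : Prop := ∀ (align : List (List Int)) (color : Int) (willreturn : Bool), Dom_judgement_multiply_live_jump_four_or_three align color willreturn → Spec_judgement_multiply_live_jump_four_or_three align color willreturn (judgement_multiply_live_jump_four_or_three align color willreturn)

-- ===== LEMMAS AND PROOFS =====

lemma zeroV4 : (0 : Int × Int × Int × Int) = (0, 0, 0, 0) := rfl

lemma addV4 (a b c d a' b' c' d' : Int) :
    ((a, b, c, d) : Int × Int × Int × Int) + (a', b', c', d') = (a + a', b + b', c + c', d + d') := rfl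

lemma sAddV4 (s : Int × Int × Int × Int) (a b c d : Int) :
    s + ((a, b, c, d) : Int × Int × Int × Int) = (s.1 + a, s.2.1 + b, s.2.2.1 + c, s.2.2.2 + d) := rfl

-- componentwise scalar multiple of a 4-vector
def vMul (v : Int × Int × Int × Int) (n : Int) : Int × Int × Int × Int :=
  (v.1 * n, v.2.1 * n, v.2.2.1 * n, v.2.2.2 * n)

-- 0/1 indicator: the window of length L starting at j matches some pattern of the group
def wIn (pats : List (List Int)) (L : Int) (i : List Int) (j : Int) : Int :=
  if PySem.List.slice i (some j) (some (j + L)) ∈ pats then 1 else 0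

def occLine (pats : List (List Int)) (L : Int) (i : List Int) : Int :=
  ((PySem.List.pyRange 0 ((i.length : Int) - L + 1) 1).map (wIn pats L i)).sum

def occAll (pats : List (List Int)) (L : Int) (align : List (List Int)) : Int :=
  (align.map (occLine pats L)).sum

lemma vMul_ite (v : Int × Int × Int × Int) (m : Prop) [Decidable m] :
    vMul v (if m then 1 else 0) = if m then v else (0 : Int × Int × Int × Int) := by
  split_ifs <;> simp [vMul, Prod.ext_iff]

lemma vMul_zero (v : Int × Int × Int × Int) : vMul v 0 = 0 := by
  simp [vMul, Prod.ext_iff]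

lemma vMul_add (v : Int × Int × Int × Int) (a b : Int) : vMul v (a + b) = vMul v a + vMul v b := by
  simp [vMul, Prod.ext_iff, Prod.fst_add, Prod.snd_add] <;> ring_nf <;> simp [mul_add]

lemma foldl_add_gen {α M : Type} [AddCommMonoid M] (l : List α) (f : α → M) (z : M) :
    l.foldl (fun s x => s + f x) z = z + (l.map f).sum := by
  induction l generalizing z with
  | nil => simp
  | cons a t ih => simp [List.foldl_cons, ih, add_assoc]

lemma sum_map_add_gen {α M : Type} [AddCommMonoid M] (l : List α) (f g : α → M) :
    (l.map (fun x => f x + g x)).sum = (l.map f).sum + (l.map g).sum := by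
  induction l with
  | nil => simp
  | cons a t ih => simp [ih]; abel

lemma vMul_sum (v : Int × Int × Int × Int) {α : Type} (l : List α) (f : α → Int) :
    (l.map (fun x => vMul v (f x))).sum = vMul v (l.map f).sum := by
  induction l with
  | nil => simp [vMul_zero]
  | cons a t ih => simp [ih, vMul_add]

lemma sum_comm2 {α β : Type} (l1 : List α) (l2 : List β) (f : α → β → Int) :
    (l1.map (fun x => (l2.map (f x)).sum)).sum = (l2.map (fun y => (l1.map (fun x => f x y)).sum)).sum := by
  induction l1 with
  | nil => simp
  | cons a t ih => simp only [List.map_cons, List.sum_cons, ih, sum_map_add_gen]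

lemma sum_ind_nodup {α : Type} [DecidableEq α] (u : List α) (hu : u.Nodup) (w : α) :
    (u.map (fun p => if w = p then (1 : Int) else 0)).sum = if w ∈ u then 1 else 0 := by
  induction u with
  | nil => simp
  | cons a t ih =>
    rcases List.nodup_cons.mp hu with ⟨ha, ht⟩
    by_cases h : w = a
    · subst h
      simp [ih ht, if_neg (fun hw => ha hw)]
    · simp [h, ih ht]

-- the window i[j:j+L] as the list of the indexed elements
lemma win_gen (l : List Int) (n L : Nat) (h : n + L ≤ l.length) :
    (l.drop n).take L = (List.range L).map (fun k => gA l ((n + k : Nat) : Int)) := by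
  apply List.ext_getElem
  · simp; omega
  · intro i h1 h2
    simp only [List.getElem_take, List.getElem_drop, List.getElem_map, List.getElem_range]
    simp only [gA, PySem.List.pyGet?_natCast]
    rw [List.getElem?_eq_getElem (by simp at h1 ⊢; omega)]
    rfl

lemma win_lit (l : List Int) (n L : Nat) (j : Int) (hj : j = (n : Int)) (h : (n : Int) + (L : Int) ≤ l.length) :
    PySem.List.slice l (some j) (some (j + L)) = (List.range L).map (fun k => gA l (j + (k : Nat))) := by
  subst hj
  rw [PySem.List.slice_natCast_add, win_gen l n L (by omega)]
  apply List.map_congr_left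
  intro k _
  push_cast
  rfl

-- per-window blocks = state + indicator-weighted group vector
lemma blockA5four_eq (c : Int) (i : List Int) (j : Int) (hj : 0 ≤ j) (hlt : j < (i.length : Int) - 4)
    (s : Int × Int × Int × Int) :
    blockA5four c i j s = s + vMul (1000,1,0,0) (wIn [[c,0,c,c,c],[c,c,0,c,c],[c,c,c,0,c]] 5 i j) := by
  obtain ⟨n, rfl⟩ := Int.eq_ofNat_of_zero_le hj
  simp only [wIn, vMul_ite]
  rw [show ((5 : Int)) = ((5 : Nat) : Int) from rfl, win_lit i n 5 _ rfl (by omega)]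
  simp only [blockA5four, List.range_succ, List.range_zero, List.map,
    List.mem_cons, List.not_mem_nil, or_false, List.cons.injEq, and_true, List.nil_append,
    List.cons_append, Nat.cast_ofNat, Nat.cast_zero, Nat.cast_one, add_zero,
    neg_one_mul, mul_neg_one, ite_or]
  generalize gA i ((n : Int)) = x0
  generalize gA i ((n : Int) + 1) = x1
  generalize gA i ((n : Int) + 2) = x2
  generalize gA i ((n : Int) + 3) = x3
  generalize gA i ((n : Int) + 4) = x4
  split_ifs <;> simp [zeroV4, addV4, sAddV4, Prod.ext_iff] <;> omega

lemma blockA5sleep_eq (c : Int) (i : List Int) (j : Int) (hj : 0 ≤ j) (hlt : j < (i.length : Int) - 4)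
    (s : Int × Int × Int × Int) :
    blockA5sleep c i j s = s + vMul (51,0,0,1) (wIn [[c,0,0,c,c],[c,c,0,0,c],[c,0,c,0,c]] 5 i j) := by
  obtain ⟨n, rfl⟩ := Int.eq_ofNat_of_zero_le hj
  simp only [wIn, vMul_ite]
  rw [show ((5 : Int)) = ((5 : Nat) : Int) from rfl, win_lit i n 5 _ rfl (by omega)]
  simp only [blockA5sleep, List.range_succ, List.range_zero, List.map,
    List.mem_cons, List.not_mem_nil, or_false, List.cons.injEq, and_true, List.nil_append,
    List.cons_append, Nat.cast_ofNat, Nat.cast_zero, Nat.cast_one, add_zero,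
    neg_one_mul, mul_neg_one, ite_or]
  generalize gA i ((n : Int)) = x0
  generalize gA i ((n : Int) + 1) = x1
  generalize gA i ((n : Int) + 2) = x2
  generalize gA i ((n : Int) + 3) = x3
  generalize gA i ((n : Int) + 4) = x4
  split_ifs <;> simp [zeroV4, addV4, sAddV4, Prod.ext_iff] <;> omega

lemma blockA5three_eq (c : Int) (i : List Int) (j : Int) (hj : 0 ≤ j) (hlt : j < (i.length : Int) - 4)
    (s : Int × Int × Int × Int) :
    blockA5three c i j s = s + vMul (200,0,1,0) (wIn [[0,c,c,c,0]] 5 i j) := by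
  obtain ⟨n, rfl⟩ := Int.eq_ofNat_of_zero_le hj
  simp only [wIn, vMul_ite]
  rw [show ((5 : Int)) = ((5 : Nat) : Int) from rfl, win_lit i n 5 _ rfl (by omega)]
  simp only [blockA5three, List.range_succ, List.range_zero, List.map,
    List.mem_cons, List.not_mem_nil, or_false, List.cons.injEq, and_true, List.nil_append,
    List.cons_append, Nat.cast_ofNat, Nat.cast_zero, Nat.cast_one, add_zero,
    neg_one_mul, mul_neg_one, ite_or]
  generalize gA i ((n : Int)) = x0
  generalize gA i ((n : Int) + 1) = x1
  generalize gA i ((n : Int) + 2) = x2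
  generalize gA i ((n : Int) + 3) = x3
  generalize gA i ((n : Int) + 4) = x4
  split_ifs <;> simp [zeroV4, addV4, sAddV4, Prod.ext_iff] <;> omega

lemma blockA6four_eq (c : Int) (i : List Int) (j : Int) (hj : 0 ≤ j) (hlt : j < (i.length : Int) - 5)
    (s : Int × Int × Int × Int) :
    blockA6four c i j s = s + vMul (1000,1,0,0) (wIn [[0,c,c,c,c,-c],[-c,c,c,c,c,0]] 6 i j) := by
  obtain ⟨n, rfl⟩ := Int.eq_ofNat_of_zero_le hj
  simp only [wIn, vMul_ite]
  rw [show ((6 : Int)) = ((6 : Nat) : Int) from rfl, win_lit i n 6 _ rfl (by omega)]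
  simp only [blockA6four, List.range_succ, List.range_zero, List.map,
    List.mem_cons, List.not_mem_nil, or_false, List.cons.injEq, and_true, List.nil_append,
    List.cons_append, Nat.cast_ofNat, Nat.cast_zero, Nat.cast_one, add_zero,
    neg_one_mul, mul_neg_one, ite_or]
  simp only [show (gA i ((n : Int) + 5) = 0 ∧ gA i ((n : Int) + 1) = c ∧ gA i ((n : Int) + 2) = c ∧
        gA i ((n : Int) + 3) = c ∧ gA i ((n : Int) + 4) = c ∧ gA i (n : Int) = -c) =
      (gA i (n : Int) = -c ∧ gA i ((n : Int) + 1) = c ∧ gA i ((n : Int) + 2) = c ∧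
        gA i ((n : Int) + 3) = c ∧ gA i ((n : Int) + 4) = c ∧ gA i ((n : Int) + 5) = 0)
      from propext (by tauto)]
  generalize gA i ((n : Int)) = x0
  generalize gA i ((n : Int) + 1) = x1
  generalize gA i ((n : Int) + 2) = x2
  generalize gA i ((n : Int) + 3) = x3
  generalize gA i ((n : Int) + 4) = x4
  generalize gA i ((n : Int) + 5) = x5
  split_ifs <;> simp [zeroV4, addV4, sAddV4, Prod.ext_iff] <;> omega

lemma blockA6three_eq (c : Int) (i : List Int) (j : Int) (hj : 0 ≤ j) (hlt : j < (i.length : Int) - 5)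
    (s : Int × Int × Int × Int) :
    blockA6three c i j s = s + vMul (200,0,1,0) (wIn [[0,c,c,0,c,0],[0,c,0,c,c,0]] 6 i j) := by
  obtain ⟨n, rfl⟩ := Int.eq_ofNat_of_zero_le hj
  simp only [wIn, vMul_ite]
  rw [show ((6 : Int)) = ((6 : Nat) : Int) from rfl, win_lit i n 6 _ rfl (by omega)]
  simp only [blockA6three, List.range_succ, List.range_zero, List.map,
    List.mem_cons, List.not_mem_nil, or_false, List.cons.injEq, and_true, List.nil_append,
    List.cons_append, Nat.cast_ofNat, Nat.cast_zero, Nat.cast_one, add_zero,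
    neg_one_mul, mul_neg_one, ite_or]
  generalize gA i ((n : Int)) = x0
  generalize gA i ((n : Int) + 1) = x1
  generalize gA i ((n : Int) + 2) = x2
  generalize gA i ((n : Int) + 3) = x3
  generalize gA i ((n : Int) + 4) = x4
  generalize gA i ((n : Int) + 5) = x5
  split_ifs <;> simp [zeroV4, addV4, sAddV4, Prod.ext_iff] <;> omega

lemma blockA6sleep_eq (c : Int) (i : List Int) (j : Int) (hj : 0 ≤ j) (hlt : j < (i.length : Int) - 5)
    (s : Int × Int × Int × Int) :
    blockA6sleep c i j s = s + vMul (51,0,0,1) (wIn [[0,0,c,c,c,-c],[-c,c,c,c,0,0],[0,c,0,c,c,-c],[-c,c,c,0,c,0],[0,c,c,0,c,-c],[-c,c,0,c,c,0]] 6 i j) := by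
  obtain ⟨n, rfl⟩ := Int.eq_ofNat_of_zero_le hj
  simp only [wIn, vMul_ite]
  rw [show ((6 : Int)) = ((6 : Nat) : Int) from rfl, win_lit i n 6 _ rfl (by omega)]
  simp only [blockA6sleep, List.range_succ, List.range_zero, List.map,
    List.mem_cons, List.not_mem_nil, or_false, List.cons.injEq, and_true, List.nil_append,
    List.cons_append, Nat.cast_ofNat, Nat.cast_zero, Nat.cast_one, add_zero,
    neg_one_mul, mul_neg_one, ite_or]
  generalize gA i ((n : Int)) = x0
  generalize gA i ((n : Int) + 1) = x1
  generalize gA i ((n : Int) + 2) = x2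
  generalize gA i ((n : Int) + 3) = x3
  generalize gA i ((n : Int) + 4) = x4
  generalize gA i ((n : Int) + 5) = x5
  split_ifs <;> simp [zeroV4, addV4, sAddV4, Prod.ext_iff] <;> omega

lemma step7_eq (c : Int) (i : List Int) (j : Int) (hj : 0 ≤ j) (hlt : j < (i.length : Int) - 6)
    (s : Int × Int × Int × Int) :
    stepA7 c i s j = s + vMul (51,0,0,1) (wIn [[-c,0,c,c,c,0,-c]] 7 i j) := by
  obtain ⟨n, rfl⟩ := Int.eq_ofNat_of_zero_le hj
  simp only [wIn, vMul_ite]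
  rw [show ((7 : Int)) = ((7 : Nat) : Int) from rfl, win_lit i n 7 _ rfl (by omega)]
  simp only [stepA7, List.range_succ, List.range_zero, List.map,
    List.mem_cons, List.not_mem_nil, or_false, List.cons.injEq, and_true, List.nil_append,
    List.cons_append, Nat.cast_ofNat, Nat.cast_zero, Nat.cast_one, add_zero,
    neg_one_mul, mul_neg_one, ite_or]
  generalize gA i ((n : Int)) = x0
  generalize gA i ((n : Int) + 1) = x1
  generalize gA i ((n : Int) + 2) = x2
  generalize gA i ((n : Int) + 3) = x3
  generalize gA i ((n : Int) + 4) = x4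
  generalize gA i ((n : Int) + 5) = x5
  generalize gA i ((n : Int) + 6) = x6
  split_ifs <;> simp [zeroV4, addV4, sAddV4, Prod.ext_iff] <;> omega

lemma step5_eq (c : Int) (i : List Int) (j : Int) (hj : 0 ≤ j) (hlt : j < (i.length : Int) - 4)
    (s : Int × Int × Int × Int) :
    stepA5 c i s j = s +
      (vMul (1000,1,0,0) (wIn [[c,0,c,c,c],[c,c,0,c,c],[c,c,c,0,c]] 5 i j)
       + vMul (51,0,0,1) (wIn [[c,0,0,c,c],[c,c,0,0,c],[c,0,c,0,c]] 5 i j)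
       + vMul (200,0,1,0) (wIn [[0,c,c,c,0]] 5 i j)) := by
  unfold stepA5
  rw [blockA5four_eq c i j hj hlt s, blockA5sleep_eq c i j hj hlt _, blockA5three_eq c i j hj hlt _]
  abel

lemma step6_eq (c : Int) (i : List Int) (j : Int) (hj : 0 ≤ j) (hlt : j < (i.length : Int) - 5)
    (s : Int × Int × Int × Int) :
    stepA6 c i s j = s +
      (vMul (1000,1,0,0) (wIn [[0,c,c,c,c,-c],[-c,c,c,c,c,0]] 6 i j)
       + vMul (200,0,1,0) (wIn [[0,c,c,0,c,0],[0,c,0,c,c,0]] 6 i j)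
       + vMul (51,0,0,1) (wIn [[0,0,c,c,c,-c],[-c,c,c,c,0,0],[0,c,0,c,c,-c],[-c,c,c,0,c,0],[0,c,c,0,c,-c],[-c,c,0,c,c,0]] 6 i j)) := by
  unfold stepA6
  rw [blockA6four_eq c i j hj hlt s, blockA6three_eq c i j hj hlt _, blockA6sleep_eq c i j hj hlt _]
  abel

-- the contribution of one line, as a sum of group terms
def lineV (c : Int) (i : List Int) : Int × Int × Int × Int :=
  vMul (1000,1,0,0) (occLine [[c,0,c,c,c],[c,c,0,c,c],[c,c,c,0,c]] 5 i)
  + vMul (51,0,0,1) (occLine [[c,0,0,c,c],[c,c,0,0,c],[c,0,c,0,c]] 5 i)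
  + vMul (200,0,1,0) (occLine [[0,c,c,c,0]] 5 i)
  + vMul (1000,1,0,0) (occLine [[0,c,c,c,c,-c],[-c,c,c,c,c,0]] 6 i)
  + vMul (200,0,1,0) (occLine [[0,c,c,0,c,0],[0,c,0,c,c,0]] 6 i)
  + vMul (51,0,0,1) (occLine [[0,0,c,c,c,-c],[-c,c,c,c,0,0],[0,c,0,c,c,-c],[-c,c,c,0,c,0],[0,c,c,0,c,-c],[-c,c,0,c,c,0]] 6 i)
  + vMul (51,0,0,1) (occLine [[-c,0,c,c,c,0,-c]] 7 i)

lemma range_fold_step {β : Type} (r : List β) (step : (Int × Int × Int × Int) → β → (Int × Int × Int × Int))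
    (d : β → Int × Int × Int × Int) (s : Int × Int × Int × Int)
    (h : ∀ t j, j ∈ r → step t j = t + d j) :
    r.foldl step s = s + (r.map d).sum := by
  rw [PySem.List.foldl_congr_mem r step (fun t j => t + d j) s (fun t j hj => h t j hj)]
  exact foldl_add_gen r d s

lemma occLine_empty (pats : List (List Int)) (L : Int) (i : List Int) (h : (i.length : Int) - L + 1 ≤ 0) :
    occLine pats L i = 0 := by
  simp [occLine, PySem.List.pyRange_one_eq_nil (by omega : (i.length : Int) - L + 1 ≤ 0)]

lemma lineA_eq (c : Int) (i : List Int) (s : Int × Int × Int × Int) :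
    lineA c s i = s + lineV c i := by
  have e5 : ((i.length : Int) - 4) = (i.length : Int) - 5 + 1 := by ring
  have e6 : ((i.length : Int) - 5) = (i.length : Int) - 6 + 1 := by ring
  have e7 : ((i.length : Int) - 6) = (i.length : Int) - 7 + 1 := by ring
  have F5 : ∀ t, (PySem.List.pyRange 0 ((i.length : Int) - 4) 1).foldl (stepA5 c i) t =
      t + (vMul (1000,1,0,0) (occLine [[c,0,c,c,c],[c,c,0,c,c],[c,c,c,0,c]] 5 i)
         + vMul (51,0,0,1) (occLine [[c,0,0,c,c],[c,c,0,0,c],[c,0,c,0,c]] 5 i)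
         + vMul (200,0,1,0) (occLine [[0,c,c,c,0]] 5 i)) := by
    intro t
    rw [range_fold_step (PySem.List.pyRange 0 ((i.length : Int) - 4) 1) (stepA5 c i)
      (fun j => vMul (1000,1,0,0) (wIn [[c,0,c,c,c],[c,c,0,c,c],[c,c,c,0,c]] 5 i j)
       + vMul (51,0,0,1) (wIn [[c,0,0,c,c],[c,c,0,0,c],[c,0,c,0,c]] 5 i j)
       + vMul (200,0,1,0) (wIn [[0,c,c,c,0]] 5 i j)) t
      (fun t j hj => by
        rw [PySem.List.mem_pyRange_one] at hj
        exact step5_eq c i j hj.1 hj.2 t)]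
    simp only [sum_map_add_gen, vMul_sum, occLine, e5]
  have F6 : ∀ t, (PySem.List.pyRange 0 ((i.length : Int) - 5) 1).foldl (stepA6 c i) t =
      t + (vMul (1000,1,0,0) (occLine [[0,c,c,c,c,-c],[-c,c,c,c,c,0]] 6 i)
         + vMul (200,0,1,0) (occLine [[0,c,c,0,c,0],[0,c,0,c,c,0]] 6 i)
         + vMul (51,0,0,1) (occLine [[0,0,c,c,c,-c],[-c,c,c,c,0,0],[0,c,0,c,c,-c],[-c,c,c,0,c,0],[0,c,c,0,c,-c],[-c,c,0,c,c,0]] 6 i)) := by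
    intro t
    rw [range_fold_step (PySem.List.pyRange 0 ((i.length : Int) - 5) 1) (stepA6 c i)
      (fun j => vMul (1000,1,0,0) (wIn [[0,c,c,c,c,-c],[-c,c,c,c,c,0]] 6 i j)
       + vMul (200,0,1,0) (wIn [[0,c,c,0,c,0],[0,c,0,c,c,0]] 6 i j)
       + vMul (51,0,0,1) (wIn [[0,0,c,c,c,-c],[-c,c,c,c,0,0],[0,c,0,c,c,-c],[-c,c,c,0,c,0],[0,c,c,0,c,-c],[-c,c,0,c,c,0]] 6 i j)) t
      (fun t j hj => by
        rw [PySem.List.mem_pyRange_one] at hj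
        exact step6_eq c i j hj.1 hj.2 t)]
    simp only [sum_map_add_gen, vMul_sum, occLine, e6]
  have F7 : ∀ t, (PySem.List.pyRange 0 ((i.length : Int) - 6) 1).foldl (stepA7 c i) t =
      t + vMul (51,0,0,1) (occLine [[-c,0,c,c,c,0,-c]] 7 i) := by
    intro t
    rw [range_fold_step (PySem.List.pyRange 0 ((i.length : Int) - 6) 1) (stepA7 c i)
      (fun j => vMul (51,0,0,1) (wIn [[-c,0,c,c,c,0,-c]] 7 i j)) t
      (fun t j hj => by
        rw [PySem.List.mem_pyRange_one] at hj
        exact step7_eq c i j hj.1 hj.2 t)]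
    simp only [vMul_sum, occLine, e7]
  simp only [lineA, lineV]
  split_ifs with h5 h6 h7
  · rw [occLine_empty _ _ _ (by omega), occLine_empty _ _ _ (by omega),
        occLine_empty _ _ _ (by omega), occLine_empty _ _ _ (by omega),
        occLine_empty _ _ _ (by omega), occLine_empty _ _ _ (by omega),
        occLine_empty _ _ _ (by omega)]
    simp [vMul_zero]
  · rw [F5]
    rw [occLine_empty _ _ _ (by omega : (i.length : Int) - 6 + 1 ≤ 0),
        occLine_empty _ _ _ (by omega : (i.length : Int) - 6 + 1 ≤ 0),
        occLine_empty _ _ _ (by omega : (i.length : Int) - 6 + 1 ≤ 0),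
        occLine_empty _ _ _ (by omega : (i.length : Int) - 7 + 1 ≤ 0)]
    simp [vMul_zero]
    try abel
  · rw [F5, F6]
    rw [occLine_empty _ _ _ (by omega : (i.length : Int) - 7 + 1 ≤ 0)]
    simp [vMul_zero]
    try abel
  · rw [F5, F6, F7]
    abel

-- B's per-group occurrence total equals the indicator total, when all patterns have length L
lemma occB_eq (align : List (List Int)) (pats : List (List Int)) (L : Int)
    (hL : ∀ p ∈ pats, (p.length : Int) = L) :
    (align.map (fun line => ((PySem.List.dedup pats).map (fun p => bOcc line p)).sum)).sum
      = occAll pats L align := by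
  unfold occAll
  apply congrArg
  apply List.map_congr_left
  intro line _
  have hbo : ∀ p ∈ PySem.List.dedup pats, bOcc line p =
      ((PySem.List.pyRange 0 ((line.length : Int) - L + 1) 1).map
        (fun j => if PySem.List.slice line (some j) (some (j + L)) = p then (1 : Int) else 0)).sum := by
    intro p hp
    have hpl : (p.length : Int) = L := hL p ((PySem.List.mem_dedup pats p).mp hp)
    rw [bOcc, PySem.List.foldl_add, zero_add, hpl]
  rw [List.map_congr_left hbo, sum_comm2]
  unfold occLine
  apply congrArg
  apply List.map_congr_left
  intro j _
  rw [sum_ind_nodup _ (PySem.List.nodup_dedup pats)]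
  unfold wIn
  simp only [PySem.List.mem_dedup]

lemma bGroupStep_eq (align : List (List Int)) (s : Int × Int × Int × Int)
    (g : List (List Int) × Int × Int × Int × Int) :
    bGroupStep align s g = s + vMul (g.2.1, g.2.2.1, g.2.2.2.1, g.2.2.2.2)
      ((align.map (fun line => ((PySem.List.dedup g.1).map (fun p => bOcc line p)).sum)).sum) := by
  simp [bGroupStep, vMul, Prod.ext_iff, Prod.fst_add, Prod.snd_add, mul_comm]

-- cores agree
lemma core_eq (align : List (List Int)) (c : Int) :
    align.foldl (lineA c) ((0,0,0,0) : Int × Int × Int × Int)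
      = (bGroups c).foldl (bGroupStep align) ((0,0,0,0) : Int × Int × Int × Int) := by
  rw [range_fold_step align (lineA c) (lineV c) _ (fun t i _ => lineA_eq c i t)]
  rw [range_fold_step (bGroups c) (bGroupStep align)
    (fun g => vMul (g.2.1, g.2.2.1, g.2.2.2.1, g.2.2.2.2)
      ((align.map (fun line => ((PySem.List.dedup g.1).map (fun p => bOcc line p)).sum)).sum)) _
    (fun t g _ => bGroupStep_eq align t g)]
  apply congrArg
  simp only [bGroups, List.map_cons, List.map_nil, List.sum_cons, List.sum_nil, add_zero]
  rw [occB_eq align _ 5 (by intro p hp; fin_cases hp <;> rfl),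
      occB_eq align _ 5 (by intro p hp; fin_cases hp <;> rfl),
      occB_eq align _ 5 (by intro p hp; fin_cases hp <;> rfl),
      occB_eq align _ 6 (by intro p hp; fin_cases hp <;> rfl),
      occB_eq align _ 6 (by intro p hp; fin_cases hp <;> rfl),
      occB_eq align _ 6 (by intro p hp; fin_cases hp <;> rfl),
      occB_eq align _ 7 (by intro p hp; fin_cases hp <;> rfl)]
  unfold lineV
  simp only [sum_map_add_gen, vMul_sum]
  unfold occAll
  abel

-- ===== VERDICT (by name: the statement is the Claim_ definition above) =====
theorem judgement_multiply_live_jump_four_or_three_spec : Claim_equal_judgement_multiply_live_jump_four_or_three := by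
  intro align color willreturn _
  unfold Spec_judgement_multiply_live_jump_four_or_three
  unfold judgement_multiply_live_jump_four_or_three judgement_multiply_live_jump_four_or_three_alt
  simp only [core_eq align color]
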